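-- pv_equiv track=rewrite | github.com/kcharris/kattis-problems | LetterWheel/letterWheel.py | get_valid2
-- ===== SOURCE A (Python) =====
-- import math
--
-- def get_valid2(lw):
--     n = len(lw)
--     valid = []
--
--     # finds all the valid shifts of level a against level b
--     def find_valid(a, b):
--         valid = set()
--         for i in range(n):
--             flag = True
--             for j in range(n):
--                 if lw[(i+j)%n][a] == lw[j][b]:
--                     flag = False
--                     break
--             if flag == True:
--                 x = i - n if i > math.floor(n/2) else i
--                 valid.add(x)
--         return valid
--
--     # the idea here is to shrink the array combinations down to only the potentially valid sets
--     # then perform a check to make sure all items are aligned on the valid sets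
--     # return the check that requires the smallest increment total
--
--     # might need to check if top valid against mid, then top and mid against bot.
--     # I think comparison can be figured out by adding adding items against each other, also maybe
--     #   the numbers being added to each other should be within the -half to half range
--
--     # after I find valid sets, the next step would be to minimize checked distances.
--
--     valid.append(find_valid(0, 1))
--     valid.append(find_valid(0, 2))
--
--     valid.append(find_valid(1, 0))
--     valid.append(find_valid(1, 2))
--
--     valid.append(find_valid(2, 0))
--     valid.append(find_valid(2, 1))
--
--     return valid
-- ===== SOURCE B (Python) =====
-- def get_valid2(lw):
--     n = len(lw)
--     cols = [[w[k] for w in lw] for k in range(3)]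
--     pos = []
--     for k in range(3):
--         d = {}
--         for p, c in enumerate(cols[k]):
--             d.setdefault(c, []).append(p)
--         pos.append(d)
--     half = n // 2
--
--     def find_valid(a, b):
--         pa = pos[a]
--         cb = cols[b]
--         invalid = {(p - j) % n for j in range(n) for p in pa.get(cb[j], ())}
--         return {i - n if i > half else i for i in range(n) if i not in invalid}
--
--     return [find_valid(a, b) for a, b in ((0, 1), (0, 2), (1, 0), (1, 2), (2, 0), (2, 1))]
-- ===== Notes on version B (the rewrite author's own statement) =====
-- stated objective: faster
-- what changed: Instead of testing every shift i with an inner scan over all j (early-break on the first collision), B groups positions of each character of the source column in a dict built once, marks the set of colliding shifts (p-j) mod n directly from the matching position pairs, and reads the valid shifts off that set.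
import Mathlib
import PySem

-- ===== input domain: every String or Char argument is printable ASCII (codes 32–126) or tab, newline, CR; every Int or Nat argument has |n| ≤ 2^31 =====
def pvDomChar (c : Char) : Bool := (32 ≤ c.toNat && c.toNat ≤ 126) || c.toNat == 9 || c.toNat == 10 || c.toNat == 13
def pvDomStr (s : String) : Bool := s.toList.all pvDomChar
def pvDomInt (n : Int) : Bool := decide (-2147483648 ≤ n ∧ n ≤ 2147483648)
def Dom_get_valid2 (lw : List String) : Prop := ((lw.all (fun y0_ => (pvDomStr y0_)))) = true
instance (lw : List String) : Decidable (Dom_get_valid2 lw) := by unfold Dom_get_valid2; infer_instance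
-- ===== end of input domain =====

-- B replaces A's per-shift inner scan (early-break collision test for every shift) by one pass that
-- groups the source column's positions by character and marks the colliding shifts (p-j) mod n directly.

-- ===== PORT A =====
-- lw[idx][k], defaulted (Pre_ keeps every access in range)
def pvCAt (lw : List String) (idx k : Int) : Char :=
  ((PySem.List.pyGet? lw idx).bind (fun s => PySem.Str.pyGet? s k)).getD ' '

-- the inner 'for j' loop with its break: returns the final flag
def pvFvLoopA (lw : List String) (n a b i : Int) : List Int → Bool
  | [] => true
  | j :: js =>
      if pvCAt lw (PySem.Int.mod (i + j) n) a = pvCAt lw j b then false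
      else pvFvLoopA lw n a b i js

-- A's find_valid(a, b)
def pvFindValidA (lw : List String) (n a b : Int) : List Int :=
  (PySem.List.pyRange 0 n).foldl (fun acc i =>
    if pvFvLoopA lw n a b i (PySem.List.pyRange 0 n) then
      PySem.Set.add acc (if i > PySem.Int.floordiv n 2 then i - n else i)
    else acc) []

def get_valid2 (lw : List String) : List (List Int) :=
  let n : Int := (lw.length : Int)
  [pvFindValidA lw n 0 1, pvFindValidA lw n 0 2,
   pvFindValidA lw n 1 0, pvFindValidA lw n 1 2,
   pvFindValidA lw n 2 0, pvFindValidA lw n 2 1]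

-- ===== PORT B =====
-- column k of the wheel (w[k] for each word), defaulted
def pvCol (lw : List String) (k : Int) : List Char :=
  lw.map (fun w => (PySem.Str.pyGet? w k).getD ' ')

-- d.setdefault(c, []).append(p) over enumerate(col): positions of each character
def pvPosDict (col : List Char) : PySem.Dict Char (List Int) :=
  (PySem.List.enumerate col 0).foldl
    (fun d pc => d.modify pc.2 [] (fun l => l ++ [pc.1])) PySem.Dict.empty

-- {(p - j) % n for j in range(n) for p in pa.get(cb[j], ())}
def pvInvalid (pa : PySem.Dict Char (List Int)) (cb : List Char) (n : Int) : PySem.Set Int :=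
  (PySem.List.pyRange 0 n).foldl (fun s j =>
    (pa.getD ((PySem.List.pyGet? cb j).getD ' ') []).foldl
      (fun s p => PySem.Set.add s (PySem.Int.mod (p - j) n)) s) []

-- B's find_valid(a, b): keep the shifts not marked invalid
def pvFindValidB (pa : PySem.Dict Char (List Int)) (cb : List Char) (n half : Int) : List Int :=
  let invalid := pvInvalid pa cb n
  (PySem.List.pyRange 0 n).foldl (fun acc i =>
    if invalid.contains i then acc
    else PySem.Set.add acc (if i > half then i - n else i)) []

def get_valid2_alt (lw : List String) : List (List Int) :=
  let n : Int := (lw.length : Int)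
  let c0 := pvCol lw 0
  let c1 := pvCol lw 1
  let c2 := pvCol lw 2
  let p0 := pvPosDict c0
  let p1 := pvPosDict c1
  let p2 := pvPosDict c2
  let half := PySem.Int.floordiv n 2
  [pvFindValidB p0 c1 n half, pvFindValidB p0 c2 n half,
   pvFindValidB p1 c0 n half, pvFindValidB p1 c2 n half,
   pvFindValidB p2 c0 n half, pvFindValidB p2 c1 n half]

-- ===== PRECONDITION & SPEC =====
-- Python A indexes every word at columns 0, 1 and 2, so it raises IndexError exactly when some
-- word is shorter than 3 characters; Pre_ excludes only those inputs (B raises there as well).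
def Pre_get_valid2 (lw : List String) : Prop := ∀ s ∈ lw, 3 ≤ s.toList.length
instance (lw : List String) : Decidable (Pre_get_valid2 lw) := by unfold Pre_get_valid2; infer_instance

def pvWitness_get_valid2 : List String := ["abc", "cab", "bca"]

def Spec_get_valid2 (lw : List String) (out : List (List Int)) : Prop := out = get_valid2_alt lw
instance (lw : List String) (out : List (List Int)) : Decidable (Spec_get_valid2 lw out) := by unfold Spec_get_valid2; infer_instance

-- ===== CLAIM (what is proved, stated in full; the proofs are below) =====
def Claim_equal_get_valid2 : Prop := ∀ (lw : List String), Dom_get_valid2 lw → Pre_get_valid2 lw → Spec_get_valid2 lw (get_valid2 lw)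

-- ===== LEMMAS AND PROOFS =====

-- the break-loop is an 'all j' test
theorem pvFvLoopA_eq_true_iff (lw : List String) (n a b i : Int) (js : List Int) :
    pvFvLoopA lw n a b i js = true ↔
      ∀ j ∈ js, pvCAt lw (PySem.Int.mod (i + j) n) a ≠ pvCAt lw j b := by
  induction js with
  | nil => simp [pvFvLoopA]
  | cons j js ih =>
      by_cases h : pvCAt lw (PySem.Int.mod (i + j) n) a = pvCAt lw j b <;>
        simp [pvFvLoopA, h, ih]

-- membership in an inner Set.add fold
theorem mem_foldl_add (f : Int → Int) (ps : List Int) (s : PySem.Set Int) (x : Int) :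
    x ∈ ps.foldl (fun s p => PySem.Set.add s (f p)) s ↔ x ∈ s ∨ ∃ p ∈ ps, x = f p := by
  induction ps generalizing s with
  | nil => simp
  | cons p ps ih => simp [ih, PySem.Set.mem_add]; tauto

-- membership in the nested marking fold
theorem mem_foldl_add_nested (l : List Int) (g : Int → List Int) (h : Int → Int → Int)
    (s : PySem.Set Int) (x : Int) :
    x ∈ l.foldl (fun s j => (g j).foldl (fun s p => PySem.Set.add s (h j p)) s) s ↔
      x ∈ s ∨ ∃ j ∈ l, ∃ p ∈ g j, x = h j p := by
  induction l generalizing s with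
  | nil => simp
  | cons j l ih => simp [ih, mem_foldl_add, or_assoc]

theorem mem_pvInvalid (pa : PySem.Dict Char (List Int)) (cb : List Char) (n x : Int) :
    x ∈ pvInvalid pa cb n ↔
      ∃ j ∈ PySem.List.pyRange 0 n,
        ∃ p ∈ pa.getD ((PySem.List.pyGet? cb j).getD ' ') [], x = PySem.Int.mod (p - j) n := by
  simpa using mem_foldl_add_nested (PySem.List.pyRange 0 n)
    (fun j => pa.getD ((PySem.List.pyGet? cb j).getD ' ') [])
    (fun j p => PySem.Int.mod (p - j) n) [] x

-- the position dict holds exactly the indices of each character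
theorem mem_pvPosDict (col : List Char) (c : Char) (p : Int) :
    p ∈ (pvPosDict col).getD c [] ↔
      ∃ k : Nat, ∃ _ : k < col.length, col[k] = c ∧ p = (k : Int) := by
  have hrw : pvPosDict col
      = ((PySem.List.enumerate col 0).map (fun pc => (pc.2, pc.1))).foldl
          (fun (d : PySem.Dict Char (List Int)) q => d.modify q.1 [] (fun l => l ++ [q.2]))
          PySem.Dict.empty := by
    unfold pvPosDict; rw [List.foldl_map]
  rw [hrw, PySem.Dict.getD_foldl_modify_append]
  simp only [PySem.Dict.getD_empty, List.nil_append, List.mem_map, List.mem_filter,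
    PySem.List.mem_enumerate_iff]
  constructor
  · rintro ⟨⟨qc, qi⟩, ⟨⟨⟨pi, pc⟩, ⟨k, hk, hpc⟩, hq⟩, hc⟩, rfl⟩
    cases hpc
    cases hq
    exact ⟨k, hk, by simpa using hc, by simp⟩
  · rintro ⟨k, hk, hc, rfl⟩
    exact ⟨(col[k], (k : Int)), ⟨⟨((k : Int), col[k]), ⟨k, hk, by simp⟩, rfl⟩, by simpa using hc⟩, rfl⟩

-- defaulted indexing into a column equals pvCAt
theorem pvCol_get (lw : List String) (k j : Int) (h0 : 0 ≤ j) (h1 : j < (lw.length : Int)) :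
    (PySem.List.pyGet? (pvCol lw k) j).getD ' ' = pvCAt lw j k := by
  obtain ⟨m, rfl⟩ : ∃ m : Nat, j = (m : Int) := ⟨j.toNat, by omega⟩
  have hm : m < lw.length := by exact_mod_cast h1
  simp [pvCol, pvCAt, hm]

theorem emod_sub_emod (x j n : Int) : (x % n - j) % n = (x - j) % n := by
  conv_rhs => rw [Int.sub_emod]
  rw [Int.sub_emod, Int.emod_emod_of_dvd _ dvd_rfl]

theorem emod_add_emod (x j n : Int) : (x % n + j) % n = (x + j) % n := by
  conv_rhs => rw [Int.add_emod]
  rw [Int.add_emod, Int.emod_emod_of_dvd _ dvd_rfl]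

-- the valid-shift test of A coincides with non-membership in B's invalid set
theorem key_iff (lw : List String) (a b i : Int)
    (h0 : 0 ≤ i) (h1 : i < (lw.length : Int)) :
    (pvFvLoopA lw (lw.length : Int) a b i (PySem.List.pyRange 0 (lw.length : Int)) = true) ↔
      i ∉ pvInvalid (pvPosDict (pvCol lw a)) (pvCol lw b) (lw.length : Int) := by
  set n : Int := (lw.length : Int) with hn
  have hnpos : 0 < n := by omega
  rw [pvFvLoopA_eq_true_iff, mem_pvInvalid]
  constructor
  · -- no collision → this shift was never marked
    intro hall hex
    obtain ⟨j, hjmem, p, hp, hip⟩ := hex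
    have hj : 0 ≤ j ∧ j < n := PySem.List.mem_pyRange_one.mp hjmem
    rw [mem_pvPosDict] at hp
    obtain ⟨k, hk, hck, rfl⟩ := hp
    have hkn : (k : Int) < n := by
      simp only [pvCol, List.length_map] at hk
      omega
    apply hall j hjmem
    have hmod : PySem.Int.mod (i + j) n = (k : Int) := by
      rw [PySem.Int.mod_eq_emod_of_pos hnpos]
      rw [PySem.Int.mod_eq_emod_of_pos hnpos] at hip
      calc (i + j) % n = (((k : Int) - j) % n + j) % n := by rw [← hip]
        _ = (((k : Int) - j) + j) % n := emod_add_emod _ _ _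
        _ = (k : Int) % n := by rw [sub_add_cancel]
        _ = (k : Int) := Int.emod_eq_of_lt (by omega) (by omega)
    rw [hmod, ← pvCol_get lw a (k : Int) (by omega) (by omega),
      PySem.List.pyGet?_natCast, List.getElem?_eq_getElem hk, Option.getD_some, hck]
    exact pvCol_get lw b j (by omega) (by omega)
  · -- no mark → no collision
    intro hnm j hjmem heq
    have hj : 0 ≤ j ∧ j < n := PySem.List.mem_pyRange_one.mp hjmem
    apply hnm
    have hk0 : 0 ≤ (i + j) % n := Int.emod_nonneg _ (by omega)
    have hk1 : (i + j) % n < n := Int.emod_lt_of_pos _ hnpos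
    obtain ⟨m, hm⟩ : ∃ m : Nat, (i + j) % n = (m : Int) := ⟨_, (Int.toNat_of_nonneg hk0).symm⟩
    have hmlen : m < lw.length := by omega
    rw [PySem.Int.mod_eq_emod_of_pos hnpos, hm] at heq
    refine ⟨j, hjmem, (m : Int), ?_, ?_⟩
    · rw [mem_pvPosDict]
      refine ⟨m, by simp [pvCol]; omega, ?_, rfl⟩
      have hmcol : m < (pvCol lw a).length := by simp [pvCol]; omega
      have h2 : (pvCol lw a)[m] = pvCAt lw (m : Int) a := by
        rw [← pvCol_get lw a (m : Int) (by omega) (by omega),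
          PySem.List.pyGet?_natCast, List.getElem?_eq_getElem hmcol, Option.getD_some]
      rw [h2, heq]
      exact (pvCol_get lw b j (by omega) (by omega)).symm
    · rw [PySem.Int.mod_eq_emod_of_pos hnpos, ← hm, emod_sub_emod,
        add_sub_cancel_right, Int.emod_eq_of_lt (by omega) (by omega)]

-- one pair of levels: A's find_valid equals B's
theorem pair_eq (lw : List String) (a b : Int) :
    pvFindValidA lw (lw.length : Int) a b =
      pvFindValidB (pvPosDict (pvCol lw a)) (pvCol lw b) (lw.length : Int)
        (PySem.Int.floordiv (lw.length : Int) 2) := by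
  unfold pvFindValidA pvFindValidB
  apply PySem.List.foldl_congr_mem
  intro acc i hi
  rw [PySem.List.mem_pyRange_one] at hi
  have h := key_iff lw a b i hi.1 hi.2
  by_cases hm : i ∈ pvInvalid (pvPosDict (pvCol lw a)) (pvCol lw b) (lw.length : Int)
  · have hv : pvFvLoopA lw (lw.length : Int) a b i
        (PySem.List.pyRange 0 (lw.length : Int)) = false := by
      rw [Bool.eq_false_iff]
      intro ht
      exact (h.mp ht) hm
    have hc : (pvInvalid (pvPosDict (pvCol lw a)) (pvCol lw b) (lw.length : Int)).contains i
        = true := (PySem.Set.contains_iff _ _).mpr hm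
    rw [hv, hc]
    simp
  · have hv : pvFvLoopA lw (lw.length : Int) a b i
        (PySem.List.pyRange 0 (lw.length : Int)) = true := h.mpr hm
    have hc : (pvInvalid (pvPosDict (pvCol lw a)) (pvCol lw b) (lw.length : Int)).contains i
        = false := by
      rw [Bool.eq_false_iff]
      intro hct
      exact hm ((PySem.Set.contains_iff _ _).mp hct)
    rw [hv, hc]
    simp

-- ===== VERDICT (by name: the statement is the Claim_ definition above) =====
theorem get_valid2_spec : Claim_equal_get_valid2 := by
  intro lw _ _
  unfold Spec_get_valid2 get_valid2 get_valid2_alt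
  simp only [pair_eq]
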